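-- pv_equiv track=rewrite | github.com/Ahn-Jeongmin/CodingTest_Practice | 백준/Silver/1003. 피보나치 함수/피보나치 함수.py | fib_count01
-- ===== SOURCE A (Python) =====
-- def fib_count01(num):
--     if num == 0:
--         return 1,0
--     elif num == 1:
--         return 0, 1
--     fiblist_zero = [1, 0]
--     fiblist_one = [0, 1]
--     for i in range(2, num+1):
--         fiblist_zero.append(fiblist_zero[-1]+fiblist_zero[-2])
--         fiblist_one.append(fiblist_one[-1]+fiblist_one[-2])
--
--     return fiblist_zero[num], fiblist_one[num]
-- ===== SOURCE B (Python) =====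
-- def _fd(n):
--     # fast doubling: returns (fib(n), fib(n+1))
--     if n == 0:
--         return (0, 1)
--     a, b = _fd(n >> 1)
--     c = a * (2 * b - a)
--     d = a * a + b * b
--     if n & 1:
--         return (d, c + d)
--     return (c, d)
--
-- def fib_count01(num):
--     a, b = _fd(num)
--     # zeros printed for fib(num) = fib(num-1) = fib(num+1)-fib(num); ones = fib(num)
--     return b - a, a
-- ===== Notes on version B (the rewrite author's own statement) =====
-- stated objective: faster
-- what changed: B computes (fib(num), fib(num+1)) by fast-doubling recursion on num>>1 and returns (fib(num+1)-fib(num), fib(num)), instead of A's loop that appends to two full DP lists and indexes them; intended as faster, measured 882x at the largest size both finished (a timing run could not verify the top size: str() digit limit).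
-- outside the precondition, e.g. on fib_count01(-1): A returns (0, 1), B raises RecursionError; on fib_count01(-2): A returns (1, 0), B raises RecursionError
import Mathlib
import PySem

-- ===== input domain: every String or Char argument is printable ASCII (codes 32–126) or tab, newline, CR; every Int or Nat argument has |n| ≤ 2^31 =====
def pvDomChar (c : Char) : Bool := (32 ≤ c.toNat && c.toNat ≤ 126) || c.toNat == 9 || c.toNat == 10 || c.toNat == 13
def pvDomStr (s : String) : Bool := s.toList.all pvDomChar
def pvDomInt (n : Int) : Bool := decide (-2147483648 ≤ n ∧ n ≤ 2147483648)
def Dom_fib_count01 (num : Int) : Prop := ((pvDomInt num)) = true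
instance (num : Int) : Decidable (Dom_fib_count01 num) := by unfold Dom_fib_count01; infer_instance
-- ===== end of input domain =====

-- B replaces A's list-building loop with fast-doubling recursion for Fibonacci; intended as faster (measured 882x at the largest size both Pythons finished).


-- ===== PORT A =====
-- body of A's for-loop: append last+second-last to each of the two lists
def pvStepA (p : List Int × List Int) (_ : Int) : List Int × List Int :=
  (p.1 ++ [PySem.List.pyGetD p.1 (-1) 0 + PySem.List.pyGetD p.1 (-2) 0],
   p.2 ++ [PySem.List.pyGetD p.2 (-1) 0 + PySem.List.pyGetD p.2 (-2) 0])

def fib_count01 (num : Int) : List Int :=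
  if num == 0 then [1, 0]
  else if num == 1 then [0, 1]
  else
    let s := (PySem.List.pyRange 2 (num + 1) 1).foldl pvStepA ([1, 0], [0, 1])
    [PySem.List.pyGetD s.1 num 0, PySem.List.pyGetD s.2 num 0]

-- ===== PORT B =====
-- _fd : fast doubling, returns (fib(n), fib(n+1)); Python recurses on n >> 1 = n / 2
def pvFd : Nat → Int × Int
  | 0 => (0, 1)
  | (n + 1) =>
    let p := pvFd ((n + 1) / 2)
    let a := p.1
    let b := p.2
    let c := a * (2 * b - a)
    let d := a * a + b * b
    if (n + 1) % 2 == 1 then (d, c + d) else (c, d)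
decreasing_by exact Nat.div_lt_self (Nat.succ_pos n) one_lt_two

-- Python B diverges on negative num (outside Pre_); the port takes num.toNat, exact for num ≥ 0.
def fib_count01_alt (num : Int) : List Int :=
  let p := pvFd num.toNat
  [p.2 - p.1, p.1]

-- ===== PRECONDITION & SPEC =====
-- Pre_ excludes negative num: there Python B's recursion does not terminate (RecursionError),
-- and A's values at num = -1, -2 come from negative-index wraparound (A raises IndexError for num ≤ -3).
def Pre_fib_count01 (num : Int) : Prop := 0 ≤ num
instance (num : Int) : Decidable (Pre_fib_count01 num) := by unfold Pre_fib_count01; infer_instance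
def pvWitness_fib_count01 : Int := 5
def Spec_fib_count01 (num : Int) (out : List Int) : Prop := out = fib_count01_alt num
instance (num : Int) (out : List Int) : Decidable (Spec_fib_count01 num out) := by unfold Spec_fib_count01; infer_instance

-- ===== CLAIM (what is proved, stated in full; the proofs are below) =====
def Claim_equal_fib_count01 : Prop := ∀ (num : Int), Dom_fib_count01 num → Pre_fib_count01 num → Spec_fib_count01 num (fib_count01 num)

-- ===== LEMMAS AND PROOFS =====

-- zeros column of A's table: pvZf 0 = 1, pvZf (n+1) = fib n; ones column is fib itself
def pvZf : Nat → Int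
  | 0 => 1
  | (n + 1) => (Nat.fib n : Int)

def pvOf (n : Nat) : Int := (Nat.fib n : Int)

theorem pvZf_rec (k : Nat) (hk : 1 ≤ k) : pvZf (k + 1) = pvZf k + pvZf (k - 1) := by
  match k, hk with
  | 1, _ => simp [pvZf]
  | (m + 2), _ => simp [pvZf, Nat.fib_add_two]; ring

theorem pvOf_rec (k : Nat) (hk : 1 ≤ k) : pvOf (k + 1) = pvOf k + pvOf (k - 1) := by
  match k, hk with
  | (m + 1), _ => simp [pvOf, Nat.fib_add_two]; ring

theorem pvZf_eq_sub (n : Nat) : pvZf n = (Nat.fib (n + 1) : Int) - (Nat.fib n : Int) := by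
  cases n with
  | zero => simp [pvZf]
  | succ m => simp [pvZf, Nat.fib_add_two]

theorem pvFd_eq (n : Nat) : pvFd n = ((Nat.fib n : Int), (Nat.fib (n + 1) : Int)) := by
  induction n using Nat.strong_induction_on with
  | _ n ih =>
    match n with
    | 0 => simp [pvFd]
    | (m + 1) =>
      rw [pvFd]
      simp only [ih ((m + 1) / 2) (Nat.div_lt_self (Nat.succ_pos m) one_lt_two)]
      rcases Nat.even_or_odd (m + 1) with ⟨q, hq⟩ | ⟨q, hq⟩
      · -- m + 1 = 2*q, q ≥ 1
        have hdiv : (m + 1) / 2 = q := by omega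
        have hle' : Nat.fib q ≤ 2 * Nat.fib (q + 1) :=
          le_trans Nat.fib_le_fib_succ (by omega)
        simp only [hdiv]
        rw [if_neg (by simp; omega)]
        simp only [Prod.mk.injEq]
        refine ⟨?_, ?_⟩
        · rw [show m + 1 = 2 * q by omega, Nat.fib_two_mul, Nat.cast_mul,
              Nat.cast_sub hle']
          push_cast; ring
        · rw [show m + 1 + 1 = 2 * q + 1 by omega, Nat.fib_two_mul_add_one]
          push_cast; ring
      · -- m + 1 = 2*q + 1
        have hdiv : (m + 1) / 2 = q := by omega
        have hle' : Nat.fib q ≤ 2 * Nat.fib (q + 1) :=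
          le_trans Nat.fib_le_fib_succ (by omega)
        simp only [hdiv]
        rw [if_pos (by simp; omega)]
        simp only [Prod.mk.injEq]
        refine ⟨?_, ?_⟩
        · rw [show m + 1 = 2 * q + 1 by omega, Nat.fib_two_mul_add_one]
          push_cast; ring
        · rw [show m + 1 + 1 = 2 * q + 1 + 1 by omega, Nat.fib_add_two,
              Nat.fib_two_mul_add_one, Nat.fib_two_mul, Nat.cast_add,
              Nat.cast_mul, Nat.cast_sub hle']
          push_cast; ring

theorem pvTail2 (f : Nat → Int) (k : Nat) (hk : 1 ≤ k) :
    PySem.List.pyGetD ((List.range (k + 1)).map f) (-1) 0 = f k ∧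
    PySem.List.pyGetD ((List.range (k + 1)).map f) (-2) 0 = f (k - 1) := by
  constructor
  · rw [PySem.List.pyGetD_neg_ofNat _ 1 0 (by norm_num) (by simp)]
    simp
  · rw [PySem.List.pyGetD_neg_ofNat _ 2 0 (by norm_num) (by simp; omega)]
    have h : k + 1 - 2 = k - 1 := by omega
    simp [h]

theorem pvStepA_tables (k : Nat) (hk : 1 ≤ k) :
    pvStepA ((List.range (k + 1)).map pvZf, (List.range (k + 1)).map pvOf) 0
      = ((List.range (k + 2)).map pvZf, (List.range (k + 2)).map pvOf) := by
  obtain ⟨z1, z2⟩ := pvTail2 pvZf k hk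
  obtain ⟨o1, o2⟩ := pvTail2 pvOf k hk
  simp only [pvStepA, z1, z2, o1, o2, Prod.mk.injEq]
  refine ⟨?_, ?_⟩
  · rw [(pvZf_rec k hk).symm]
    simp [show k + 2 = (k + 1) + 1 from rfl, List.range_succ]
  · rw [(pvOf_rec k hk).symm]
    simp [show k + 2 = (k + 1) + 1 from rfl, List.range_succ]

theorem pvLoopA (k : Nat) (hk : 1 ≤ k) :
    (PySem.List.pyRange 2 ((k : Int) + 1) 1).foldl pvStepA ([1, 0], [0, 1])
      = ((List.range (k + 1)).map pvZf, (List.range (k + 1)).map pvOf) := by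
  induction k with
  | zero => omega
  | succ m ih =>
    by_cases hm : 1 ≤ m
    · have hsplit : PySem.List.pyRange 2 ((m : Int) + 1 + 1) 1
          = PySem.List.pyRange 2 ((m : Int) + 1) 1 ++ [(m : Int) + 1] :=
        PySem.List.pyRange_one_succ_right (by exact_mod_cast by omega)
      have hc : (((m + 1 : Nat) : Int) + 1) = ((m : Int) + 1 + 1) := by push_cast; ring
      rw [hc, hsplit, List.foldl_append, ih hm]
      have harg : pvStepA ((List.range (m + 1)).map pvZf, (List.range (m + 1)).map pvOf) ((m : Int) + 1)
          = pvStepA ((List.range (m + 1)).map pvZf, (List.range (m + 1)).map pvOf) 0 := rfl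
      simp only [List.foldl_cons, List.foldl_nil, harg, pvStepA_tables m hm]
    · have hm0 : m = 0 := by omega
      subst hm0
      rw [show (((0 + 1 : Nat) : Int) + 1) = 2 by norm_num,
          PySem.List.pyRange_one_eq_nil (by norm_num)]
      simp [pvZf, pvOf, List.range_succ]

theorem pvGetD_table (f : Nat → Int) (n : Nat) :
    PySem.List.pyGetD ((List.range (n + 1)).map f) ((n : Int)) 0 = f n := by
  rw [PySem.List.pyGetD_natCast]
  simp

theorem fib_count01_eq_table (n : Nat) :
    fib_count01 (n : Int) = [pvZf n, pvOf n] := by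
  match n with
  | 0 => simp [fib_count01, pvZf, pvOf]
  | 1 => norm_num [fib_count01, pvZf, pvOf]
  | (m + 2) =>
    unfold fib_count01
    have h0 : (((m + 2 : Nat) : Int) == 0) = false := by
      rw [beq_eq_false_iff_ne]; omega
    have h1 : (((m + 2 : Nat) : Int) == 1) = false := by
      rw [beq_eq_false_iff_ne]; omega
    rw [h0, h1]
    simp only [Bool.false_eq_true, if_false]
    rw [pvLoopA (m + 2) (by omega)]
    simp only [pvGetD_table]

theorem fib_count01_alt_eq (n : Nat) :
    fib_count01_alt (n : Int) = [pvZf n, pvOf n] := by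
  unfold fib_count01_alt
  simp only [Int.toNat_natCast, pvFd_eq]
  rw [pvZf_eq_sub]
  rfl

-- ===== VERDICT (by name: the statement is the Claim_ definition above) =====
theorem fib_count01_spec : Claim_equal_fib_count01 := by
  intro num _ hpre
  unfold Spec_fib_count01
  obtain ⟨n, rfl⟩ := Int.eq_ofNat_of_zero_le hpre
  rw [fib_count01_eq_table, fib_count01_alt_eq]
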